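-- pv_equiv track=rewrite | github.com/Tsukumo1/DAIL-cypher | utils/utils.py | tokenize_cypher
-- ===== SOURCE A (Python) =====
-- def tokenize_cypher(cypher):
--     tokens = []
--     current_token = ''
--     in_string = False
--     for char in cypher:
--         if char in [' ', '\n', '\t'] and not in_string:
--             if current_token:
--                 tokens.append(current_token)
--                 current_token = ''
--         elif char == "'" and not in_string:
--             in_string = True
--             current_token += char
--         elif char == "'" and in_string:
--             in_string = False
--             current_token += char
--             tokens.append(current_token)
--             current_token = ''
--         else:
--             current_token += char
--     if current_token:
--         tokens.append(current_token)
--     return tokens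
-- ===== SOURCE B (Python) =====
-- def tokenize_cypher(cypher):
--     # Index-based scanner: skip separators, then slice out one whole token at a
--     # time (plain run, optionally ending in a quoted segment), instead of A's
--     # char-by-char accumulator state machine.
--     tokens = []
--     i = 0
--     n = len(cypher)
--     while i < n:
--         c = cypher[i]
--         if c in " \n\t":
--             i += 1
--         elif c == "'":
--             k = cypher.find("'", i + 1)
--             if k == -1:
--                 tokens.append(cypher[i:])
--                 i = n
--             else:
--                 tokens.append(cypher[i:k + 1])
--                 i = k + 1
--         else:
--             j = i + 1
--             while j < n and cypher[j] not in " \n\t'":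
--                 j += 1
--             if j < n and cypher[j] == "'":
--                 k = cypher.find("'", j + 1)
--                 if k == -1:
--                     tokens.append(cypher[i:])
--                     i = n
--                 else:
--                     tokens.append(cypher[i:k + 1])
--                     i = k + 1
--             else:
--                 tokens.append(cypher[i:j])
--                 i = j
--     return tokens
-- ===== Notes on version B (the rewrite author's own statement) =====
-- stated objective: alternative
-- what changed: A builds tokens char-by-char with a current-token accumulator and an in-string flag; B instead scans with indices and slices whole tokens out of the input (skip separators, scan a plain run, jump to the closing quote with str.find).
import Mathlib
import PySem

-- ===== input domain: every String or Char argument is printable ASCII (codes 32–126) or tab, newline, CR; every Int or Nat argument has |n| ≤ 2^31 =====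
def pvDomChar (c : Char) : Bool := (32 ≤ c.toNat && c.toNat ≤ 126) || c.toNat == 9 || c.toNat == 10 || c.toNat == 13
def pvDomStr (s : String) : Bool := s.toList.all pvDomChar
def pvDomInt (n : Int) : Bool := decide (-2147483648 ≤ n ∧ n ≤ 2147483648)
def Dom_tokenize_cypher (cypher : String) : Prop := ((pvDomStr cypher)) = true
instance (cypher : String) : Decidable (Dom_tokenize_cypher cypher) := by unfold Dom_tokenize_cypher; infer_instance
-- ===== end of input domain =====

-- B replaces A's char-by-char accumulator state machine by an index-based scanner that
-- slices whole tokens out of the input (objective: alternative structure, same O(n) cost).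

-- ===== PORT A =====
-- current_token is represented as its list of characters (a Python string), joined by
-- String.ofList exactly when A appends it to tokens.
def pvStepA (st : List String × List Char × Bool) (c : Char) :
    List String × List Char × Bool :=
  let tokens := st.1
  let cur := st.2.1
  let ins := st.2.2
  if (c = ' ' ∨ c = '\n' ∨ c = '\t') ∧ ins = false then
    if cur ≠ [] then (tokens ++ [String.ofList cur], [], ins) else (tokens, cur, ins)
  else if c = '\'' ∧ ins = false then (tokens, cur ++ [c], true)
  else if c = '\'' ∧ ins = true then (tokens ++ [String.ofList (cur ++ [c])], [], false)
  else (tokens, cur ++ [c], ins)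

def tokenize_cypher (cypher : String) : List String :=
  let st := cypher.toList.foldl pvStepA ([], [], false)
  if st.2.1 ≠ [] then st.1 ++ [String.ofList st.2.1] else st.1

-- ===== PORT B =====
def pvSep (c : Char) : Bool := (c == ' ') || (c == '\n') || (c == '\t')

-- cypher.find("'", k): first index ≥ k holding a quote (none = -1)
def pvFind (cs : List Char) (k : Nat) : Option Nat :=
  if h : k < cs.length then
    if cs[k] = '\'' then some k else pvFind cs (k + 1)
  else none
termination_by cs.length - k

-- the inner while loop: first index ≥ j holding a separator or quote
def pvScan (cs : List Char) (j : Nat) : Nat :=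
  if h : j < cs.length then
    if pvSep cs[j] || (cs[j] == '\'') then j else pvScan cs (j + 1)
  else j
termination_by cs.length - j

-- termination facts for pvLoop (cited in decreasing_by)
theorem pvFind_ge (cs : List Char) (k : Nat) {m : Nat} (h : pvFind cs k = some m) : k ≤ m := by
  fun_induction pvFind cs k with
  | case1 => simp_all
  | case2 _ _ _ ih => exact Nat.le_of_succ_le (ih h)
  | case3 => simp_all

theorem pvScan_ge (cs : List Char) (j : Nat) : j ≤ pvScan cs j := by
  fun_induction pvScan cs j with
  | case1 => exact Nat.le_refl _
  | case2 _ _ _ ih => exact Nat.le_of_succ_le ih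
  | case3 => exact Nat.le_refl _

-- Python slices cypher[i:] and cypher[i:k+1] with 0 ≤ i (exact: drop/take)
def pvLoop (cs : List Char) (i : Nat) (tokens : List String) : List String :=
  if h : i < cs.length then
    if pvSep cs[i] then pvLoop cs (i + 1) tokens
    else if cs[i] = '\'' then
      match hf : pvFind cs (i + 1) with
      | none => tokens ++ [String.ofList (cs.drop i)]
      | some k => pvLoop cs (k + 1) (tokens ++ [String.ofList ((cs.drop i).take (k + 1 - i))])
    else
      let j := pvScan cs (i + 1)
      if j < cs.length ∧ cs.getD j ' ' = '\'' then
        match hf : pvFind cs (j + 1) with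
        | none => tokens ++ [String.ofList (cs.drop i)]
        | some k => pvLoop cs (k + 1) (tokens ++ [String.ofList ((cs.drop i).take (k + 1 - i))])
      else pvLoop cs j (tokens ++ [String.ofList ((cs.drop i).take (j - i))])
  else tokens
termination_by cs.length - i
decreasing_by
  · omega
  · have := pvFind_ge cs (i + 1) hf; omega
  · have h1 := pvScan_ge cs (i + 1); have := pvFind_ge cs (pvScan cs (i + 1) + 1) hf; omega
  · have h1 := pvScan_ge cs (i + 1); omega

def tokenize_cypher_alt (cypher : String) : List String :=
  pvLoop cypher.toList 0 []

-- ===== PRECONDITION & SPEC =====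
def Spec_tokenize_cypher (cypher : String) (out : List String) : Prop := out = tokenize_cypher_alt cypher
instance (cypher : String) (out : List String) : Decidable (Spec_tokenize_cypher cypher out) := by unfold Spec_tokenize_cypher; infer_instance

-- ===== CLAIM (what is proved, stated in full; the proofs are below) =====
def Claim_equal_tokenize_cypher : Prop := ∀ (cypher : String), Dom_tokenize_cypher cypher → Spec_tokenize_cypher cypher (tokenize_cypher cypher)

-- ===== LEMMAS AND PROOFS =====

-- common continuation: the tokens still to be produced from the remaining input,
-- given the current token `cur` and the in-string flag `ins`
def pvCont (ins : Bool) (cur : List Char) : List Char → List String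
  | [] => if cur ≠ [] then [String.ofList cur] else []
  | c :: cs =>
    if (c = ' ' ∨ c = '\n' ∨ c = '\t') ∧ ins = false then
      (if cur ≠ [] then [String.ofList cur] else []) ++ pvCont false [] cs
    else if c = '\'' ∧ ins = false then pvCont true (cur ++ [c]) cs
    else if c = '\'' ∧ ins = true then String.ofList (cur ++ [c]) :: pvCont false [] cs
    else pvCont ins (cur ++ [c]) cs

theorem foldA_cont (cs : List Char) : ∀ (tokens : List String) (cur : List Char) (ins : Bool),
    (let st := cs.foldl pvStepA (tokens, cur, ins);
     if st.2.1 ≠ [] then st.1 ++ [String.ofList st.2.1] else st.1) = tokens ++ pvCont ins cur cs := by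
  induction cs with
  | nil => intro tokens cur ins; simp only [List.foldl_nil, pvCont]; split_ifs <;> simp
  | cons c cs ih =>
    intro tokens cur ins
    simp only [List.foldl_cons, pvCont, pvStepA]
    by_cases hq : c = '\''
    · subst hq
      cases ins <;> simp [ih]
    · by_cases hw : c = ' ' ∨ c = '\n' ∨ c = '\t'
      · cases ins
        · rcases hw with h|h|h <;> subst h <;>
            by_cases h2 : cur = [] <;> simp [h2, ih]
        · rcases hw with h|h|h <;> subst h <;> simp [ih]
      · cases ins <;> simp [hw, hq, ih]

theorem pvSep_iff (c : Char) : pvSep c = true ↔ (c = ' ' ∨ c = '\n' ∨ c = '\t') := by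
  simp [pvSep]
  tauto

theorem pvCont_plain_run (seg : List Char) : ∀ (cur rest : List Char),
    (∀ c ∈ seg, ¬(c = ' ' ∨ c = '\n' ∨ c = '\t') ∧ c ≠ '\'') →
    pvCont false cur (seg ++ rest) = pvCont false (cur ++ seg) rest := by
  induction seg with
  | nil => simp
  | cons c seg ih =>
    intro cur rest h
    obtain ⟨h1, h2⟩ := h c (by simp)
    simp only [List.cons_append, pvCont]
    rw [if_neg (by simp [h1]), if_neg (by simp [h2]), if_neg (by simp [h2]),
      ih (cur ++ [c]) rest (fun x hx => h x (by simp [hx]))]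
    simp

theorem pvCont_quote_run (seg : List Char) : ∀ (cur rest : List Char),
    (∀ c ∈ seg, c ≠ '\'') →
    pvCont true cur (seg ++ rest) = pvCont true (cur ++ seg) rest := by
  induction seg with
  | nil => simp
  | cons c seg ih =>
    intro cur rest h
    have h2 := h c (by simp)
    simp only [List.cons_append, pvCont]
    rw [if_neg (by simp), if_neg (by simp [h2]), if_neg (by simp [h2]),
      ih (cur ++ [c]) rest (fun x hx => h x (by simp [hx]))]
    simp

theorem pvFind_none_spec (cs : List Char) (k : Nat) (h : pvFind cs k = none) :
    ∀ m, k ≤ m → m < cs.length → cs.getD m ' ' ≠ '\'' := by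
  fun_induction pvFind cs k with
  | case1 => simp_all
  | case2 k hlt hne ih =>
    intro m hm hmlen
    rcases Nat.eq_or_lt_of_le hm with rfl | hlt2
    · rw [List.getD_eq_getElem _ _ hmlen]; exact hne
    · exact ih h m hlt2 hmlen
  | case3 k hge =>
    intro m hm hmlen; omega

theorem pvFind_some_spec (cs : List Char) (k : Nat) {m : Nat} (h : pvFind cs k = some m) :
    k ≤ m ∧ m < cs.length ∧ cs.getD m ' ' = '\'' ∧
      (∀ t, k ≤ t → t < m → cs.getD t ' ' ≠ '\'') := by
  fun_induction pvFind cs k with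
  | case1 k hlt heq =>
    simp only [Option.some.injEq] at h
    subst h
    exact ⟨Nat.le_refl _, hlt, by rw [List.getD_eq_getElem _ _ hlt]; exact heq,
      fun t ht1 ht2 => absurd ht1 (by omega)⟩
  | case2 k hlt hne ih =>
    obtain ⟨h1, h2, h3, h4⟩ := ih h
    refine ⟨by omega, h2, h3, fun t ht1 ht2 => ?_⟩
    rcases Nat.eq_or_lt_of_le ht1 with rfl | hlt2
    · rw [List.getD_eq_getElem _ _ hlt]; exact hne
    · exact h4 t hlt2 ht2
  | case3 k _ => simp_all

theorem pvScan_le (cs : List Char) (j : Nat) :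
    pvScan cs j ≤ cs.length ∨ pvScan cs j = j := by
  fun_induction pvScan cs j with
  | case1 j hlt _ => left; omega
  | case2 j hlt _ ih =>
    rcases ih with h | h
    · left; exact h
    · left; omega
  | case3 j hge => right; rfl

theorem pvScan_plain (cs : List Char) (j : Nat) :
    ∀ m, j ≤ m → m < pvScan cs j →
      ¬(cs.getD m ' ' = ' ' ∨ cs.getD m ' ' = '\n' ∨ cs.getD m ' ' = '\t') ∧ cs.getD m ' ' ≠ '\'' := by
  fun_induction pvScan cs j with
  | case1 j hlt hstop => intro m hm hlt2; omega
  | case2 j hlt hcond ih =>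
    intro m hm hlt2
    rcases Nat.eq_or_lt_of_le hm with rfl | hgt
    · rw [List.getD_eq_getElem _ _ hlt]
      simp only [Bool.or_eq_true, beq_iff_eq] at hcond
      push Not at hcond
      constructor
      · rw [← pvSep_iff]; simp [hcond.1]
      · exact hcond.2
    · exact ih m hgt hlt2
  | case3 j hge => intro m hm hlt2; omega

theorem pvScan_stop (cs : List Char) (j : Nat) (h : pvScan cs j < cs.length) :
    pvSep (cs.getD (pvScan cs j) ' ') = true ∨ cs.getD (pvScan cs j) ' ' = '\'' := by
  fun_induction pvScan cs j with
  | case1 j hlt hcond =>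
    rw [List.getD_eq_getElem _ _ h]
    simpa using hcond
  | case2 j _ _ ih => exact ih h
  | case3 j hge => omega

theorem pvDrop_split (cs : List Char) (p k : Nat) (_hpk : p ≤ k) :
    cs.drop p = (cs.drop p).take (k - p) ++ cs.drop k := by
  conv_lhs => rw [← List.take_append_drop (k - p) (cs.drop p)]
  rw [List.drop_drop]
  congr 2
  omega

theorem pvMem_seg (cs : List Char) (p k : Nat) (x : Char)
    (hx : x ∈ (cs.drop p).take (k - p)) :
    ∃ m, p ≤ m ∧ m < k ∧ m < cs.length ∧ x = cs.getD m ' ' := by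
  rw [List.mem_iff_getElem] at hx
  obtain ⟨t, ht, hxe⟩ := hx
  have htl : t < (cs.drop p).length := by
    simp at ht ⊢
    omega
  have hpl : p + t < cs.length := by
    simp at htl
    omega
  refine ⟨p + t, by omega, by simp at ht; omega, hpl, ?_⟩
  rw [← hxe, List.getElem_take, List.getElem_drop, List.getD_eq_getElem _ _ hpl]

theorem pvMem_drop (cs : List Char) (p : Nat) (x : Char) (hx : x ∈ cs.drop p) :
    ∃ m, p ≤ m ∧ m < cs.length ∧ x = cs.getD m ' ' := by
  obtain ⟨m, h1, h2, h3, h4⟩ := pvMem_seg cs p cs.length x (by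
    have : (cs.drop p).take (cs.length - p) = cs.drop p := by
      rw [← List.length_drop (l := cs) (i := p)]
      exact List.take_length ..
    rwa [this])
  exact ⟨m, h1, h3, h4⟩

theorem pvNoQuote_seg (cs : List Char) (p k : Nat)
    (h : ∀ t, p ≤ t → t < k → cs.getD t ' ' ≠ '\'') :
    ∀ c ∈ (cs.drop p).take (k - p), c ≠ '\'' := by
  intro x hx
  obtain ⟨m, h1, h2, h3, h4⟩ := pvMem_seg cs p k x hx
  subst h4
  exact h m h1 h2

theorem pvSeg_split (cs : List Char) (p k : Nat) (hpk : p ≤ k) (hk : k < cs.length)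
    (hq : cs.getD k ' ' = '\'') :
    cs.drop p = ((cs.drop p).take (k - p) ++ ['\'']) ++ cs.drop (k + 1) := by
  have h1 : cs.drop k = '\'' :: cs.drop (k + 1) := by
    rw [List.getD_eq_getElem _ _ hk] at hq
    rw [List.drop_eq_getElem_cons hk, hq]
  conv_lhs => rw [pvDrop_split cs p k hpk, h1]
  simp

theorem pvSeg_len (cs : List Char) (p k : Nat) (_hpk : p ≤ k) (hk : k ≤ cs.length) :
    ((cs.drop p).take (k - p)).length = k - p := by
  simp
  omega

theorem pvLoop_cont (cs : List Char) (i : Nat) (tokens : List String) :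
    pvLoop cs i tokens = tokens ++ pvCont false [] (cs.drop i) := by
  fun_induction pvLoop cs i tokens with
  | case1 i tokens h hsep ih =>
    rw [ih, List.drop_eq_getElem_cons h]
    simp only [pvCont]
    rw [if_pos (⟨(pvSep_iff _).1 hsep, by trivial⟩)]
    simp
  | case2 i tokens h hsep hq hf =>
    have hnq : ∀ c ∈ cs.drop (i + 1), c ≠ '\'' := by
      intro x hx
      obtain ⟨m, h1, h2, h3⟩ := pvMem_drop cs (i + 1) x hx
      subst h3
      exact pvFind_none_spec cs (i + 1) hf m h1 h2
    have hrun := pvCont_quote_run (cs.drop (i + 1)) ['\''] [] hnq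
    rw [List.append_nil] at hrun
    rw [List.drop_eq_getElem_cons h, hq]
    simp only [pvCont]
    rw [if_neg (by simp), if_pos (by simp)]
    simp only [List.nil_append] at hrun ⊢
    rw [hrun]
    simp [pvCont]
  | case3 i tokens h hsep hq k hf ih =>
    obtain ⟨hk1, hk2, hk3, hk4⟩ := pvFind_some_spec cs (i + 1) hf
    set seg := (cs.drop (i + 1)).take (k - (i + 1)) with hseg
    have hnq : ∀ c ∈ seg, c ≠ '\'' := pvNoQuote_seg cs (i + 1) k hk4
    have hsplit : cs.drop (i + 1) = (seg ++ ['\'']) ++ cs.drop (k + 1) :=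
      pvSeg_split cs (i + 1) k hk1 hk2 hk3
    have htok : (cs.drop i).take (k + 1 - i) = cs[i] :: (seg ++ ['\'']) := by
      rw [List.drop_eq_getElem_cons h, hsplit, ← List.cons_append]
      apply List.take_left'
      have hl := pvSeg_len cs (i + 1) k hk1 (by omega)
      rw [← hseg] at hl
      simp [hl]
      omega
    rw [ih, htok]
    have hcont : pvCont false [] (cs.drop i) =
        String.ofList (cs[i] :: (seg ++ ['\''])) :: pvCont false [] (cs.drop (k + 1)) := by
      rw [List.drop_eq_getElem_cons h, hq, hsplit]
      simp only [pvCont]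
      rw [if_neg (by simp), if_pos (by simp)]
      simp only [List.nil_append, List.append_assoc, List.singleton_append]
      rw [pvCont_quote_run seg ['\''] _ hnq]
      simp only [pvCont]
      rw [if_neg (by simp), if_neg (by simp), if_pos (by simp)]
      simp
    rw [hcont]
    simp
  | case4 i tokens h hsep hq j hcond hf =>
    obtain ⟨hj1, hj2⟩ := hcond
    have hji : i + 1 ≤ j := pvScan_ge cs (i + 1)
    set segP := (cs.drop i).take (j - i) with hsegP
    have hplain : ∀ c ∈ segP, ¬(c = ' ' ∨ c = '\n' ∨ c = '\t') ∧ c ≠ '\'' := by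
      intro x hx
      obtain ⟨m, h1, h2, h3, h4⟩ := pvMem_seg cs i j x hx
      subst h4
      rcases Nat.eq_or_lt_of_le h1 with rfl | hmi
      · rw [List.getD_eq_getElem _ _ h]
        exact ⟨by rw [← pvSep_iff]; simp [hsep], hq⟩
      · exact pvScan_plain cs (i + 1) m hmi h2
    have hnq : ∀ c ∈ cs.drop (j + 1), c ≠ '\'' := by
      intro x hx
      obtain ⟨m, h1, h2, h3⟩ := pvMem_drop cs (j + 1) x hx
      subst h3
      exact pvFind_none_spec cs (j + 1) hf m h1 h2
    have hsplit : cs.drop i = (segP ++ ['\'']) ++ cs.drop (j + 1) :=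
      pvSeg_split cs i j (by omega) hj1 hj2
    have hrun := pvCont_quote_run (cs.drop (j + 1)) (segP ++ ['\'']) [] hnq
    rw [List.append_nil] at hrun
    have hcont : pvCont false [] (cs.drop i) = [String.ofList (cs.drop i)] := by
      conv_lhs => rw [hsplit]
      rw [List.append_assoc, List.singleton_append]
      rw [pvCont_plain_run segP [] _ hplain]
      simp only [List.nil_append, pvCont]
      rw [if_neg (by simp), if_pos (by simp)]
      rw [hrun]
      simp [pvCont, hsplit]
    rw [hcont]
  | case5 i tokens h hsep hq j hcond k hf ih =>
    obtain ⟨hj1, hj2⟩ := hcond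
    have hji : i + 1 ≤ j := pvScan_ge cs (i + 1)
    obtain ⟨hk1, hk2, hk3, hk4⟩ := pvFind_some_spec cs (j + 1) hf
    set segP := (cs.drop i).take (j - i) with hsegP
    set segQ := (cs.drop (j + 1)).take (k - (j + 1)) with hsegQ
    have hplain : ∀ c ∈ segP, ¬(c = ' ' ∨ c = '\n' ∨ c = '\t') ∧ c ≠ '\'' := by
      intro x hx
      obtain ⟨m, h1, h2, h3, h4⟩ := pvMem_seg cs i j x hx
      subst h4
      rcases Nat.eq_or_lt_of_le h1 with rfl | hmi
      · rw [List.getD_eq_getElem _ _ h]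
        exact ⟨by rw [← pvSep_iff]; simp [hsep], hq⟩
      · exact pvScan_plain cs (i + 1) m hmi h2
    have hnq : ∀ c ∈ segQ, c ≠ '\'' := pvNoQuote_seg cs (j + 1) k hk4
    have hsplit1 : cs.drop i = (segP ++ ['\'']) ++ cs.drop (j + 1) :=
      pvSeg_split cs i j (by omega) hj1 hj2
    have hsplit2 : cs.drop (j + 1) = (segQ ++ ['\'']) ++ cs.drop (k + 1) :=
      pvSeg_split cs (j + 1) k hk1 hk2 hk3
    have htok : (cs.drop i).take (k + 1 - i) = (segP ++ ['\'']) ++ (segQ ++ ['\'']) := by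
      conv_lhs => rw [hsplit1, hsplit2]
      rw [← List.append_assoc]
      apply List.take_left'
      have hl1 := pvSeg_len cs i j (by omega) (by omega)
      have hl2 := pvSeg_len cs (j + 1) k hk1 (by omega)
      rw [← hsegP] at hl1
      rw [← hsegQ] at hl2
      simp [hl1, hl2]
      omega
    rw [ih, htok]
    have hcont : pvCont false [] (cs.drop i) =
        String.ofList ((segP ++ ['\'']) ++ (segQ ++ ['\''])) :: pvCont false [] (cs.drop (k + 1)) := by
      conv_lhs => rw [hsplit1]
      rw [List.append_assoc, List.singleton_append]
      rw [pvCont_plain_run segP [] _ hplain]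
      simp only [List.nil_append, pvCont]
      rw [if_neg (by simp), if_pos (by simp)]
      conv_lhs => rw [hsplit2]
      rw [List.append_assoc, List.singleton_append]
      rw [pvCont_quote_run segQ _ _ hnq]
      simp only [pvCont]
      rw [if_neg (by simp), if_neg (by simp), if_pos (by simp)]
      simp
    rw [hcont]
    simp
  | case6 i tokens h hsep hq j hncond ih =>
    have hji : i + 1 ≤ j := pvScan_ge cs (i + 1)
    have hjle : j ≤ cs.length := by
      rcases pvScan_le cs (i + 1) with h1 | h1
      · exact h1
      · omega
    set segP := (cs.drop i).take (j - i) with hsegP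
    have hplain : ∀ c ∈ segP, ¬(c = ' ' ∨ c = '\n' ∨ c = '\t') ∧ c ≠ '\'' := by
      intro x hx
      obtain ⟨m, h1, h2, h3, h4⟩ := pvMem_seg cs i j x hx
      subst h4
      rcases Nat.eq_or_lt_of_le h1 with rfl | hmi
      · rw [List.getD_eq_getElem _ _ h]
        exact ⟨by rw [← pvSep_iff]; simp [hsep], hq⟩
      · exact pvScan_plain cs (i + 1) m hmi h2
    have hsegne : segP ≠ [] := by
      have hl := pvSeg_len cs i j (by omega) hjle
      rw [← hsegP] at hl
      intro hc
      rw [hc] at hl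
      simp at hl
      omega
    have hsplit : cs.drop i = segP ++ cs.drop j := pvDrop_split cs i j (by omega)
    rw [ih]
    conv_rhs => rw [hsplit]
    rw [pvCont_plain_run segP [] _ hplain]
    simp only [List.nil_append]
    rcases Nat.eq_or_lt_of_le hjle with heq | hjlt
    · rw [heq, List.drop_length]
      simp [pvCont, hsegne]
    · have hstop := pvScan_stop cs (i + 1) hjlt
      have hsep2 : pvSep (cs.getD j ' ') = true := by
        rcases hstop with h1 | h1
        · exact h1
        · exact absurd ⟨hjlt, h1⟩ hncond
      rw [List.drop_eq_getElem_cons hjlt]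
      rw [List.getD_eq_getElem _ _ hjlt] at hsep2
      rcases (pvSep_iff _).1 hsep2 with h1 | h1 | h1 <;>
        rw [h1] <;> simp [pvCont, hsegne]
  | case7 i tokens h =>
    rw [List.drop_of_length_le (by omega)]
    simp [pvCont]

-- ===== VERDICT (by name: the statement is the Claim_ definition above) =====
theorem tokenize_cypher_spec : Claim_equal_tokenize_cypher := by
  intro cypher _
  unfold Spec_tokenize_cypher tokenize_cypher tokenize_cypher_alt
  rw [pvLoop_cont]
  simpa using foldA_cont cypher.toList [] [] false
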